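-- pv_equiv track=rewrite | github.com/ctoth/propstore | propstore/argumentation.py | _transitive_support_targets
-- ===== SOURCE A (Python) =====
-- def _transitive_support_targets(
--     source: str,
--     supports: set[tuple[str, str]],
--     visited: set[str] | None = None,
-- ) -> set[str]:
--     """Compute all arguments reachable from source via support edges."""
--     if visited is None:
--         visited = set()
--     visited.add(source)
--     targets: set[str] = set()
--     for a, b in supports:
--         if a == source and b not in visited:
--             targets.add(b)
--             targets |= _transitive_support_targets(b, supports, visited)
--     return targets
-- ===== SOURCE B (Python) =====
-- def _transitive_support_targets(
--     source: str,
--     supports: set[tuple[str, str]],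
--     visited: set[str] | None = None,
-- ) -> set[str]:
--     """Compute all arguments reachable from source via support edges.
--
--     Iterative depth-first search over an adjacency index built once,
--     instead of rescanning every edge at every visited node.
--     """
--     if visited is None:
--         visited = set()
--     adj: dict[str, list[str]] = {}
--     for a, b in supports:
--         adj.setdefault(a, []).append(b)
--     visited.add(source)
--     targets: set[str] = set()
--     stack = list(reversed(adj.get(source, [])))
--     while stack:
--         n = stack.pop()
--         if n in visited:
--             continue
--         visited.add(n)
--         targets.add(n)
--         stack.extend(reversed(adj.get(n, [])))
--     return targets
-- ===== Notes on version B (the rewrite author's own statement) =====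
-- stated objective: alternative
-- what changed: A rescans the whole support-edge set at every visited node and recurses; B builds an adjacency dict of the edges once and then runs an iterative explicit-stack DFS over it, so each edge is inspected a constant number of times.
import Mathlib
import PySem

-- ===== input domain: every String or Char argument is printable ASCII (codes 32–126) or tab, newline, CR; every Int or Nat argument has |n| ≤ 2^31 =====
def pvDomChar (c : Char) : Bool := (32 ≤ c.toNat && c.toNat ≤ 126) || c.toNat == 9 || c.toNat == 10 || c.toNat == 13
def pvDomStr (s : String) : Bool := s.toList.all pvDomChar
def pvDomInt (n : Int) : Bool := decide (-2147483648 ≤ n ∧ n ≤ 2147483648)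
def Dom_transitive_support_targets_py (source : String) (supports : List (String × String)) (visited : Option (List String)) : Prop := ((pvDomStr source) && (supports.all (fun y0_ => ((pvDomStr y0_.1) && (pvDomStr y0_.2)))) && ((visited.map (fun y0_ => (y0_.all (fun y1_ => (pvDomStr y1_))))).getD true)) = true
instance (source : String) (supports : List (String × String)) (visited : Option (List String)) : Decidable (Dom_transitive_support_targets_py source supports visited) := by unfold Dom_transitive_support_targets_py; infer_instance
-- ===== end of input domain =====

-- B replaces A's recursive rescan of every edge at every visited node by an adjacency dict
-- built once plus an explicit-stack DFS (objective: alternative algorithm).  Equivalence is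
-- about the RETURN value; both Pythons also add the reached nodes to a caller-supplied
-- `visited` set.

-- ===== PORT A =====
-- The Python recursion mutates one shared `visited` set; the port threads it explicitly,
-- returning the pair (targets, visited).  Python's `visited.add(source)` at function entry
-- is performed at the call sites.  `fuel` only makes the recursion structurally total; the
-- proofs show the wrapper's fuel is never exhausted.
def pyAgo (supports : List (String × String)) (fuel : Nat) (es : List (String × String))
    (source : String) (targets visited : PySem.Set String) :
    PySem.Set String × PySem.Set String :=
  match fuel, es with
  | _, [] => (targets, visited)
  | 0, _ :: _ => (targets, visited)
  | fuel + 1, (a, b) :: es =>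
    if a == source && !(PySem.Set.contains visited b) then
      let targets1 := PySem.Set.add targets b
      let r := pyAgo supports fuel supports b PySem.Set.empty (PySem.Set.add visited b)
      pyAgo supports (fuel + 1) es source (PySem.Set.union targets1 r.1) r.2
    else
      pyAgo supports (fuel + 1) es source targets visited
termination_by (fuel, es.length)

def transitive_support_targets_py (source : String) (supports : List (String × String))
    (visited : Option (List String)) : List String :=
  let v0 : PySem.Set String :=
    match visited with
    | none => PySem.Set.empty
    | some vs => PySem.Set.ofList vs
  (pyAgo supports (supports.length + 1) supports source PySem.Set.empty
    (PySem.Set.add v0 source)).1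

-- ===== PORT B =====
-- adj = {};  for a, b in supports: adj.setdefault(a, []).append(b)
def pyBadj (supports : List (String × String)) : PySem.Dict String (List String) :=
  supports.foldl (fun d p => d.modify p.1 [] (fun l => l ++ [p.2])) PySem.Dict.empty

-- Port of B's while loop.  The Lean stack keeps Python's stack reversed (head = top), so
-- Python's `stack.extend(reversed(children))` followed by `stack.pop()` is
-- `children ++ stack` with pops at the head.  `fuel` only makes the loop structurally total.
def pyBloop (adj : PySem.Dict String (List String)) (fuel : Nat)
    (visited targets : PySem.Set String) (stack : List String) : PySem.Set String :=
  match fuel, stack with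
  | _, [] => targets
  | 0, _ :: _ => targets
  | fuel + 1, n :: stack =>
    if PySem.Set.contains visited n then
      pyBloop adj (fuel + 1) visited targets stack
    else
      pyBloop adj fuel (PySem.Set.add visited n) (PySem.Set.add targets n)
        (PySem.Dict.getD adj n [] ++ stack)
termination_by (fuel, stack.length)

def transitive_support_targets_py_alt (source : String) (supports : List (String × String))
    (visited : Option (List String)) : List String :=
  let v0 : PySem.Set String :=
    match visited with
    | none => PySem.Set.empty
    | some vs => PySem.Set.ofList vs
  let adj := pyBadj supports
  pyBloop adj (supports.length + 1) (PySem.Set.add v0 source) PySem.Set.empty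
    (PySem.Dict.getD adj source [])

-- ===== PRECONDITION & SPEC =====
def Spec_transitive_support_targets_py (source : String) (supports : List (String × String)) (visited : Option (List String)) (out : List String) : Prop := out = transitive_support_targets_py_alt source supports visited
instance (source : String) (supports : List (String × String)) (visited : Option (List String)) (out : List String) : Decidable (Spec_transitive_support_targets_py source supports visited out) := by unfold Spec_transitive_support_targets_py; infer_instance

-- ===== CLAIM (what is proved, stated in full; the proofs are below) =====
def Claim_equal_transitive_support_targets_py : Prop := ∀ (source : String) (supports : List (String × String)) (visited : Option (List String)), Dom_transitive_support_targets_py source supports visited → Spec_transitive_support_targets_py source supports visited (transitive_support_targets_py source supports visited)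

-- ===== LEMMAS AND PROOFS =====

-- children of c among the edges es, in edge order
def chl (es : List (String × String)) (c : String) : List String :=
  (es.filter (fun p => p.1 == c)).map (fun p => p.2)

-- all edge targets
def snds (supports : List (String × String)) : List String := supports.map Prod.snd

-- number of edge targets not yet visited (the common fuel/termination measure)
def unseen (supports : List (String × String)) (v : List String) : Nat :=
  ((snds supports).toFinset \ v.toFinset).card

lemma chl_cons (a b : String) (es : List (String × String)) (c : String) :
    chl ((a, b) :: es) c = if a == c then b :: chl es c else chl es c := by
  by_cases h : a = c <;> simp [chl, h]

lemma mem_chl_mem_snds {supports es : List (String × String)} {c x : String}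
    (hes : ∀ e ∈ es, e ∈ supports) (hx : x ∈ chl es c) : x ∈ snds supports := by
  simp only [chl, List.mem_map, List.mem_filter] at hx
  obtain ⟨p, ⟨hp, _⟩, rfl⟩ := hx
  exact List.mem_map_of_mem (hes p hp)

lemma adj_getD (supports : List (String × String)) (c : String) :
    PySem.Dict.getD (pyBadj supports) c [] = chl supports c := by
  simpa [pyBadj, chl] using
    PySem.Dict.getD_foldl_modify_append supports PySem.Dict.empty c

lemma unseen_le (supports : List (String × String)) (v : List String) :
    unseen supports v ≤ supports.length := by
  calc unseen supports v ≤ (snds supports).toFinset.card :=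
        Finset.card_le_card Finset.sdiff_subset
    _ ≤ (snds supports).length := (snds supports).toFinset_card_le
    _ = supports.length := by simp [snds]

lemma unseen_append_le (supports : List (String × String)) (v w : List String) :
    unseen supports (v ++ w) ≤ unseen supports v := by
  apply Finset.card_le_card
  intro x hx
  simp only [Finset.mem_sdiff, List.toFinset_append, Finset.mem_union, List.mem_toFinset] at *
  tauto

lemma unseen_append_singleton {supports : List (String × String)} {v : List String} {b : String}
    (hb : b ∈ snds supports) (hbv : b ∉ v) :
    unseen supports (v ++ [b]) + 1 = unseen supports v := by
  have hmem : b ∈ (snds supports).toFinset \ v.toFinset := by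
    simp [List.mem_toFinset, hb, hbv]
  have hset : (snds supports).toFinset \ (v ++ [b]).toFinset
      = ((snds supports).toFinset \ v.toFinset).erase b := by
    ext x
    simp only [Finset.mem_sdiff, List.toFinset_append, Finset.mem_union, List.mem_toFinset,
      Finset.mem_erase, List.mem_singleton]
    tauto
  rw [unseen, hset, Finset.card_erase_of_mem hmem]
  have := Finset.card_pos.mpr ⟨b, hmem⟩
  unfold unseen
  omega

-- A's targets/visited both grow by the same fresh block Δ, independent of the
-- incoming targets accumulator.
lemma pyAgo_shape (supports : List (String × String)) :
    ∀ (fuel : Nat) (es : List (String × String)) (source : String) (v : PySem.Set String),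
      ∃ Δ : List String, Δ.Nodup ∧ (∀ x ∈ Δ, x ∉ v) ∧
        ∀ t : PySem.Set String, (∀ x ∈ t, x ∈ v) →
          pyAgo supports fuel es source t v = (t ++ Δ, v ++ Δ) := by
  intro fuel
  induction fuel using Nat.strong_induction_on with
  | _ fuel IHf =>
  intro es
  induction es with
  | nil =>
    intro source v
    exact ⟨[], by simp, by simp, fun t ht => by cases fuel <;> simp [pyAgo]⟩
  | cons e es IHes =>
    intro source v
    obtain ⟨a, b⟩ := e
    cases fuel with
    | zero => exact ⟨[], by simp, by simp, fun t ht => by simp [pyAgo]⟩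
    | succ f =>
      by_cases ha : a = source
      · by_cases hbv : b ∈ v
        · have hg : (a == source && !(PySem.Set.contains v b)) = false := by
            simp [ha, hbv]
          obtain ⟨Δ, hnd, hfresh, heq⟩ := IHes source v
          refine ⟨Δ, hnd, hfresh, fun t ht => ?_⟩
          rw [pyAgo]
          simp only [hg, Bool.false_eq_true, if_false]
          exact heq t ht
        · have hg : (a == source && !(PySem.Set.contains v b)) = true := by
            simp only [Bool.and_eq_true, beq_iff_eq, ha, Bool.not_eq_true', true_and]
            exact (Bool.not_eq_true _).mp (fun h => hbv ((PySem.Set.contains_iff v b).mp h))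
          have haddv : PySem.Set.add v b = v ++ [b] := PySem.Set.add_of_not_mem hbv
          obtain ⟨Δ₁, hnd₁, hfresh₁, heq₁⟩ := IHf f (Nat.lt_succ_self f) supports b (v ++ [b])
          obtain ⟨Δ₂, hnd₂, hfresh₂, heq₂⟩ := IHes source (v ++ [b] ++ Δ₁)
          have hbΔ₁ : b ∉ Δ₁ := fun h => hfresh₁ b h (by simp)
          have hbΔ₂ : b ∉ Δ₂ := fun h => hfresh₂ b h (by simp)
          have hΔ₁Δ₂ : ∀ x ∈ Δ₁, x ∉ Δ₂ := fun x h1 h2 => hfresh₂ x h2 (by simp [h1])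
          refine ⟨b :: (Δ₁ ++ Δ₂), ?_, ?_, fun t ht => ?_⟩
          · simp only [List.nodup_cons, List.mem_append, List.nodup_append]
            exact ⟨fun h => h.elim hbΔ₁ hbΔ₂, hnd₁, hnd₂,
              fun x h1 y h2 e => hΔ₁Δ₂ x h1 (e ▸ h2)⟩
          · intro x hx
            simp only [List.mem_cons, List.mem_append] at hx
            rcases hx with rfl | hx | hx
            · exact hbv
            · exact fun h => hfresh₁ x hx (by simp [h])
            · exact fun h => hfresh₂ x hx (by simp [h])
          · have hbt : b ∉ t := fun h => hbv (ht b h)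
            have haddt : PySem.Set.add t b = t ++ [b] := PySem.Set.add_of_not_mem hbt
            have hrec := heq₁ PySem.Set.empty (by intro x hx; simp [PySem.Set.empty] at hx)
            have hun : PySem.Set.union (t ++ [b]) Δ₁ = t ++ [b] ++ Δ₁ :=
              PySem.Set.update_eq_append_of_disjoint _ _ hnd₁
                (fun x hx hmem => by
                  rcases List.mem_append.mp hmem with h | h
                  · exact hfresh₁ x hx (by simp [ht x h])
                  · simp only [List.mem_singleton] at h
                    exact hbΔ₁ (h ▸ hx))
            have hcont := heq₂ (t ++ [b] ++ Δ₁)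
              (by
                intro x hx
                simp only [List.mem_append, List.mem_singleton] at hx
                rcases hx with (h | rfl) | h
                · simp [ht x h]
                · simp
                · simp [h])
            rw [pyAgo]
            simp only [hg, if_true]
            rw [haddt, haddv, hrec]
            simp only [PySem.Set.empty, List.nil_append]
            rw [hun, hcont]
            simp [List.append_assoc]
      · have hg : (a == source && !(PySem.Set.contains v b)) = false := by
          simp [ha]
        obtain ⟨Δ, hnd, hfresh, heq⟩ := IHes source v
        refine ⟨Δ, hnd, hfresh, fun t ht => ?_⟩
        rw [pyAgo]
        simp only [hg, Bool.false_eq_true, if_false]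
        exact heq t ht

-- with enough fuel on both sides, the fuel does not matter
lemma pyAgo_irrel (supports : List (String × String)) :
    ∀ (n : Nat) (v : PySem.Set String), unseen supports v = n →
    ∀ (es : List (String × String)), (∀ e ∈ es, e ∈ supports) →
    ∀ (f₁ f₂ : Nat), n + 1 ≤ f₁ → n + 1 ≤ f₂ →
    ∀ (source : String) (t : PySem.Set String),
      pyAgo supports f₁ es source t v = pyAgo supports f₂ es source t v := by
  intro n
  induction n using Nat.strong_induction_on with
  | _ n IHn =>
  intro v hv es
  induction es with
  | nil =>
    intro _ f₁ f₂ _ _ source t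
    cases f₁ <;> cases f₂ <;> simp [pyAgo]
  | cons e es IHes =>
    intro hes f₁ f₂ hf₁ hf₂ source t
    obtain ⟨a, b⟩ := e
    obtain ⟨k₁, rfl⟩ : ∃ k, f₁ = k + 1 := ⟨f₁ - 1, by omega⟩
    obtain ⟨k₂, rfl⟩ : ∃ k, f₂ = k + 1 := ⟨f₂ - 1, by omega⟩
    have hes' : ∀ e ∈ es, e ∈ supports := fun e h => hes e (List.mem_cons_of_mem _ h)
    by_cases hg : (a == source && !(PySem.Set.contains v b)) = true
    · have hbv : b ∉ v := by
        intro h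
        simp at hg
        exact hg.2 h
      have hbs : b ∈ snds supports :=
        List.mem_map_of_mem (hes _ List.mem_cons_self)
      have haddv : PySem.Set.add v b = v ++ [b] := PySem.Set.add_of_not_mem hbv
      have hu : unseen supports (v ++ [b]) + 1 = n := by
        rw [unseen_append_singleton hbs hbv, hv]
      have hinner : pyAgo supports k₁ supports b PySem.Set.empty (v ++ [b])
          = pyAgo supports k₂ supports b PySem.Set.empty (v ++ [b]) :=
        IHn (unseen supports (v ++ [b])) (by omega) _ rfl supports (fun e h => h)
          k₁ k₂ (by omega) (by omega) b _
      obtain ⟨Δ₁, hnd₁, hfresh₁, heq₁⟩ := pyAgo_shape supports k₂ supports b (v ++ [b])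
      have hrec := heq₁ PySem.Set.empty (by simp [PySem.Set.empty])
      rw [pyAgo, pyAgo]
      simp only [hg, if_true]
      rw [haddv, hinner, hrec]
      have hvle : unseen supports (v ++ [b] ++ Δ₁) ≤ unseen supports (v ++ [b]) :=
        unseen_append_le supports (v ++ [b]) Δ₁
      exact IHn (unseen supports (v ++ [b] ++ Δ₁)) (by omega) _ rfl es hes'
        (k₁ + 1) (k₂ + 1) (by omega) (by omega) source _
    · simp only [Bool.not_eq_true] at hg
      rw [pyAgo, pyAgo]
      simp only [hg, Bool.false_eq_true, if_false]
      exact IHes hes' (k₁ + 1) (k₂ + 1) hf₁ hf₂ source t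

lemma pyBloop_nil (adj : PySem.Dict String (List String)) (fuel : Nat)
    (v t : PySem.Set String) : pyBloop adj fuel v t [] = t := by
  cases fuel <;> simp [pyBloop]

lemma pyBloop_irrel (supports : List (String × String)) (adj : PySem.Dict String (List String))
    (Hadj : ∀ c, PySem.Dict.getD adj c [] = chl supports c) :
    ∀ (n : Nat) (v : PySem.Set String), unseen supports v = n →
    ∀ (stack : List String), (∀ x ∈ stack, x ∈ snds supports) →
    ∀ (f₁ f₂ : Nat), n + 1 ≤ f₁ → n + 1 ≤ f₂ →
    ∀ (t : PySem.Set String),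
      pyBloop adj f₁ v t stack = pyBloop adj f₂ v t stack := by
  intro n
  induction n using Nat.strong_induction_on with
  | _ n IHn =>
  intro v hv stack
  induction stack with
  | nil =>
    intro _ f₁ f₂ _ _ t
    cases f₁ <;> cases f₂ <;> simp [pyBloop]
  | cons m st IHst =>
    intro hst f₁ f₂ hf₁ hf₂ t
    obtain ⟨k₁, rfl⟩ : ∃ k, f₁ = k + 1 := ⟨f₁ - 1, by omega⟩
    obtain ⟨k₂, rfl⟩ : ∃ k, f₂ = k + 1 := ⟨f₂ - 1, by omega⟩
    have hst' : ∀ x ∈ st, x ∈ snds supports := fun x h => hst x (List.mem_cons_of_mem _ h)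
    by_cases hm : m ∈ v
    · have hc : PySem.Set.contains v m = true := (PySem.Set.contains_iff v m).mpr hm
      rw [pyBloop, pyBloop]
      simp only [hc, if_true]
      exact IHst hst' (k₁ + 1) (k₂ + 1) hf₁ hf₂ t
    · have hc : PySem.Set.contains v m = false := by simp [hm]
      rw [pyBloop, pyBloop]
      simp only [hc, Bool.false_eq_true, if_false]
      have hms : m ∈ snds supports := hst m List.mem_cons_self
      rw [PySem.Set.add_of_not_mem hm]
      have hu : unseen supports (v ++ [m]) + 1 = n := by
        rw [unseen_append_singleton hms hm, hv]
      refine IHn (unseen supports (v ++ [m])) (by omega) _ rfl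
        (PySem.Dict.getD adj m [] ++ st) ?_ k₁ k₂ (by omega) (by omega) _
      intro x hx
      rcases List.mem_append.mp hx with h | h
      · rw [Hadj] at h
        exact mem_chl_mem_snds (fun e he => he) h
      · exact hst' x h

-- the simulation: running B's stack loop on A's pending children equals finishing
-- A's scan and going on with the rest of the stack
lemma key (supports : List (String × String)) (adj : PySem.Dict String (List String))
    (Hadj : ∀ c, PySem.Dict.getD adj c [] = chl supports c) :
    ∀ (n : Nat) (v : PySem.Set String), unseen supports v = n →
    ∀ (es : List (String × String)) (source : String) (stack : List String)
      (tB : PySem.Set String),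
      (∀ e ∈ es, e ∈ supports) → (∀ x ∈ stack, x ∈ snds supports) →
      (∀ x ∈ tB, x ∈ v) →
      pyBloop adj (unseen supports v + 1) v tB (chl es source ++ stack)
        = pyBloop adj
            (unseen supports (pyAgo supports (unseen supports v + 1) es source PySem.Set.empty v).2 + 1)
            (pyAgo supports (unseen supports v + 1) es source PySem.Set.empty v).2
            (tB ++ (pyAgo supports (unseen supports v + 1) es source PySem.Set.empty v).1)
            stack := by
  intro n
  induction n using Nat.strong_induction_on with
  | _ n IHn =>
  intro v hv es
  induction es with
  | nil =>
    intro source stack tB _ _ _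
    simp [pyAgo, chl, PySem.Set.empty]
  | cons e es IHes =>
    intro source stack tB hes hstack htB
    obtain ⟨a, b⟩ := e
    have hes' : ∀ e ∈ es, e ∈ supports := fun e h => hes e (List.mem_cons_of_mem _ h)
    by_cases ha : a = source
    · subst ha
      by_cases hbv : b ∈ v
      · -- A's guard rejects b (already visited); B pops it and skips with the same fuel
        have hc : PySem.Set.contains v b = true := (PySem.Set.contains_iff v b).mpr hbv
        rw [chl_cons]
        simp only [beq_self_eq_true, if_true]
        rw [List.cons_append, pyBloop]
        simp only [hc, if_true]
        rw [pyAgo]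
        have hg : (a == a && !(PySem.Set.contains v b)) = false := by simp [hbv]
        simp only [hg, Bool.false_eq_true, if_false]
        exact IHes a stack tB hes' hstack htB
      · -- the interesting case: b is newly discovered on both sides
        have hbt : b ∉ tB := fun h => hbv (htB b h)
        have hbs : b ∈ snds supports := List.mem_map_of_mem (hes _ List.mem_cons_self)
        have hu : unseen supports (v ++ [b]) + 1 = unseen supports v :=
          unseen_append_singleton hbs hbv
        have hvn : unseen supports (v ++ [b]) < n := by omega
        obtain ⟨Δ₁, hnd₁, hfresh₁, heq₁⟩ :=
          pyAgo_shape supports (unseen supports (v ++ [b]) + 1) supports b (v ++ [b])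
        have hr1 : pyAgo supports (unseen supports (v ++ [b]) + 1) supports b
            PySem.Set.empty (v ++ [b]) = (Δ₁, v ++ [b] ++ Δ₁) := by
          simpa [PySem.Set.empty] using heq₁ PySem.Set.empty (by simp [PySem.Set.empty])
        obtain ⟨Δ₂, hnd₂, hfresh₂, heq₂⟩ :=
          pyAgo_shape supports (unseen supports (v ++ [b] ++ Δ₁) + 1) es a (v ++ [b] ++ Δ₁)
        have hs0 : pyAgo supports (unseen supports (v ++ [b] ++ Δ₁) + 1) es a
            PySem.Set.empty (v ++ [b] ++ Δ₁) = (Δ₂, v ++ [b] ++ Δ₁ ++ Δ₂) := by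
          simpa [PySem.Set.empty] using heq₂ PySem.Set.empty (by simp [PySem.Set.empty])
        have ht2 : pyAgo supports (unseen supports (v ++ [b] ++ Δ₁) + 1) es a
            ([b] ++ Δ₁) (v ++ [b] ++ Δ₁) = (([b] ++ Δ₁) ++ Δ₂, v ++ [b] ++ Δ₁ ++ Δ₂) := by
          refine heq₂ ([b] ++ Δ₁) ?_
          intro x hx
          rcases List.mem_append.mp hx with h | h
          · simp only [List.mem_singleton] at h
            simp [h]
          · simp [h]
        have hv₂le : unseen supports (v ++ [b] ++ Δ₁) ≤ unseen supports (v ++ [b]) :=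
          unseen_append_le supports (v ++ [b]) Δ₁
        -- reduce A's call on the right-hand side
        have hRHS : pyAgo supports (unseen supports v + 1) ((a, b) :: es) a
            PySem.Set.empty v = (([b] ++ Δ₁) ++ Δ₂, v ++ [b] ++ Δ₁ ++ Δ₂) := by
          have hg : (a == a && !(PySem.Set.contains v b)) = true := by simp [hbv]
          rw [pyAgo]
          simp only [hg, if_true]
          rw [PySem.Set.add_of_not_mem hbv]
          have hinner : pyAgo supports (unseen supports v) supports b PySem.Set.empty
              (v ++ [b]) = (Δ₁, v ++ [b] ++ Δ₁) := by rw [← hu]; exact hr1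
          rw [hinner]
          have hadd0 : PySem.Set.add (PySem.Set.empty : PySem.Set String) b = [b] := rfl
          have hun : PySem.Set.union ([b] : PySem.Set String) Δ₁ = [b] ++ Δ₁ :=
            PySem.Set.update_eq_append_of_disjoint _ _ hnd₁
              (fun x hx hmem => by
                simp only [List.mem_singleton] at hmem
                exact hfresh₁ x hx (by simp [hmem]))
          rw [hadd0, hun]
          have hirr := pyAgo_irrel supports (unseen supports (v ++ [b] ++ Δ₁))
            (v ++ [b] ++ Δ₁) rfl es hes'
            (unseen supports v + 1) (unseen supports (v ++ [b] ++ Δ₁) + 1)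
            (by omega) le_rfl a ([b] ++ Δ₁)
          rw [hirr, ht2]
        rw [hRHS, chl_cons]
        simp only [beq_self_eq_true, if_true]
        rw [List.cons_append, pyBloop]
        have hc : PySem.Set.contains v b = false := by simp [hbv]
        simp only [hc, Bool.false_eq_true, if_false]
        rw [PySem.Set.add_of_not_mem hbv, PySem.Set.add_of_not_mem hbt, Hadj, ← hu]
        have h1 := IHn (unseen supports (v ++ [b])) hvn (v ++ [b]) rfl supports b
          (chl es a ++ stack) (tB ++ [b]) (fun e he => he)
          (by
            intro x hx
            rcases List.mem_append.mp hx with h | h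
            · exact mem_chl_mem_snds hes' h
            · exact hstack x h)
          (by
            intro x hx
            rcases List.mem_append.mp hx with h | h
            · simp [htB x h]
            · simp only [List.mem_singleton] at h
              simp [h])
        rw [hr1] at h1
        simp only [] at h1
        rw [h1]
        have h2 := IHn (unseen supports (v ++ [b] ++ Δ₁)) (by omega) (v ++ [b] ++ Δ₁) rfl
          es a stack (tB ++ [b] ++ Δ₁) hes' hstack
          (by
            intro x hx
            rcases List.mem_append.mp hx with h | h
            · rcases List.mem_append.mp h with h' | h'
              · simp [htB x h']
              · simp only [List.mem_singleton] at h'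
                simp [h']
            · simp [h])
        rw [hs0] at h2
        simp only [] at h2
        rw [h2]
        simp [List.append_assoc]
    · -- edge does not start at source: both sides ignore it
      rw [chl_cons]
      have hab : (a == source) = false := by simp [ha]
      simp only [hab, Bool.false_eq_true, if_false]
      rw [pyAgo]
      have hg : (a == source && !(PySem.Set.contains v b)) = false := by simp [ha]
      simp only [hg, Bool.false_eq_true, if_false]
      exact IHes source stack tB hes' hstack htB

lemma main_eq (supports : List (String × String)) (source : String) (v0 : PySem.Set String) :
    (pyAgo supports (supports.length + 1) supports source PySem.Set.empty
      (PySem.Set.add v0 source)).1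
    = pyBloop (pyBadj supports) (supports.length + 1) (PySem.Set.add v0 source)
        PySem.Set.empty (PySem.Dict.getD (pyBadj supports) source []) := by
  set v1 := PySem.Set.add v0 source with hv1
  have hnle : unseen supports v1 + 1 ≤ supports.length + 1 := by
    have := unseen_le supports v1; omega
  have hA : pyAgo supports (supports.length + 1) supports source PySem.Set.empty v1
      = pyAgo supports (unseen supports v1 + 1) supports source PySem.Set.empty v1 :=
    pyAgo_irrel supports (unseen supports v1) v1 rfl supports (fun e he => he)
      (supports.length + 1) (unseen supports v1 + 1) hnle le_rfl source _
  have hBadj : ∀ c, PySem.Dict.getD (pyBadj supports) c [] = chl supports c := adj_getD supports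
  have hB : pyBloop (pyBadj supports) (supports.length + 1) v1 PySem.Set.empty
      (PySem.Dict.getD (pyBadj supports) source [])
      = pyBloop (pyBadj supports) (unseen supports v1 + 1) v1 PySem.Set.empty
        (PySem.Dict.getD (pyBadj supports) source []) :=
    pyBloop_irrel supports _ hBadj (unseen supports v1) v1 rfl _
      (by
        intro x hx
        rw [hBadj] at hx
        exact mem_chl_mem_snds (fun e he => he) hx)
      _ _ hnle le_rfl _
  rw [hA, hB, hBadj]
  have hk := key supports (pyBadj supports) hBadj (unseen supports v1) v1 rfl supports source
    [] PySem.Set.empty (fun e he => he) (by simp) (by simp [PySem.Set.empty])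
  rw [List.append_nil] at hk
  rw [hk, pyBloop_nil]
  simp [PySem.Set.empty]

-- ===== VERDICT (by name: the statement is the Claim_ definition above) =====
theorem transitive_support_targets_py_spec : Claim_equal_transitive_support_targets_py := by
  intro source supports visited _
  unfold Spec_transitive_support_targets_py
  unfold transitive_support_targets_py transitive_support_targets_py_alt
  cases visited with
  | none => exact main_eq supports source PySem.Set.empty
  | some vs => exact main_eq supports source (PySem.Set.ofList vs)
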